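-- pv_equiv track=rewrite | github.com/miliarch/bitcalc | bitcalc/interface.py | format_table_divider
-- ===== SOURCE A (Python) =====
-- def format_table_divider(scan_str, match_char='|', i_char='+', fill_char='-'):
--     """ Format and return a divider for use in table printing
--
--     Input:
--         - scan_str: Full string to analyze for character matching
--         - match_char: Character that indicates a match
--         - i_char: Character to use in match positions
--         - fill_char: Character to use in non-match positions
--
--     Output: String to be used as a divider in tabular data output
--     """
--     i_positions = [idx for idx, c in enumerate(scan_str) if c == match_char]
--     divider = ''
--     for i in range(len(scan_str)):
--         if i in i_positions:
--             divider += i_char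
--         else:
--             divider += fill_char
--     return divider
-- ===== SOURCE B (Python) =====
-- def format_table_divider(scan_str, match_char='|', i_char='+', fill_char='-'):
--     """Single direct pass: each output chunk is decided locally from the
--     character alone; no position index, no membership test."""
--     return ''.join(i_char if c == match_char else fill_char for c in scan_str)
-- ===== Notes on version B (the rewrite author's own statement) =====
-- stated objective: simpler
-- what changed: Drops A's precomputed i_positions index list and the per-index membership scan: B is a single ''.join over scan_str that decides each output chunk locally from the character alone.
import Mathlib
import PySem

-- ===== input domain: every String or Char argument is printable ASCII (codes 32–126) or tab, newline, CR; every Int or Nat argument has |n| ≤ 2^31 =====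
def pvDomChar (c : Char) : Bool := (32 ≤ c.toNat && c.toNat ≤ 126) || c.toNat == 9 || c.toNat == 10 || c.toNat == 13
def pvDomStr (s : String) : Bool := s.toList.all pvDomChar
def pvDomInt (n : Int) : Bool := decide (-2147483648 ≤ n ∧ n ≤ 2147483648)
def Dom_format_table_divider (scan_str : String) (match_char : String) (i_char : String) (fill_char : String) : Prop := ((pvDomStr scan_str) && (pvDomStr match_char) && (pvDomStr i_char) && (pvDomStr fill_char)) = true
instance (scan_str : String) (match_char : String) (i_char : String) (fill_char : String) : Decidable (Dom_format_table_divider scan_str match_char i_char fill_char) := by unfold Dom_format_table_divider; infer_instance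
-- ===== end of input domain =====

-- ===== PORT A =====
-- Literal port of A: build the i_positions index list from enumerate(scan_str),
-- then loop over range(len(scan_str)) appending i_char / fill_char by membership test.
def format_table_divider (scan_str : String) (match_char : String) (i_char : String) (fill_char : String) : String :=
  let s := scan_str.toList
  let i_positions : List Int :=
    ((PySem.List.enumerate s 0).filter (fun p => [p.2] == match_char.toList)).map (·.1)
  String.ofList ((PySem.List.pyRange 0 (PySem.List.len s) 1).foldl
    (fun divider i =>
      if i_positions.contains i then divider ++ i_char.toList else divider ++ fill_char.toList)
    ([] : List Char))

-- ===== PORT B =====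
-- Literal port of B: ''.join(i_char if c == match_char else fill_char for c in scan_str)
def format_table_divider_alt (scan_str : String) (match_char : String) (i_char : String) (fill_char : String) : String :=
  String.ofList (PySem.Chars.join []
    (scan_str.toList.map (fun c =>
      if [c] == match_char.toList then i_char.toList else fill_char.toList)))

-- ===== PRECONDITION & SPEC =====
def Spec_format_table_divider (scan_str : String) (match_char : String) (i_char : String) (fill_char : String) (out : String) : Prop := out = format_table_divider_alt scan_str match_char i_char fill_char
instance (scan_str : String) (match_char : String) (i_char : String) (fill_char : String) (out : String) : Decidable (Spec_format_table_divider scan_str match_char i_char fill_char out) := by unfold Spec_format_table_divider; infer_instance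

-- ===== CLAIM (what is proved, stated in full; the proofs are below) =====
def Claim_equal_format_table_divider : Prop := ∀ (scan_str : String) (match_char : String) (i_char : String) (fill_char : String), Dom_format_table_divider scan_str match_char i_char fill_char → Spec_format_table_divider scan_str match_char i_char fill_char (format_table_divider scan_str match_char i_char fill_char)

-- ===== LEMMAS AND PROOFS =====

-- ===== VERDICT (by name: the statement is the Claim_ definition above) =====
-- ''.join with an empty separator is concatenation
theorem join_nil_eq_flatten (l : List (List Char)) :
    PySem.Chars.join [] l = l.flatten := by
  induction l with
  | nil => simp [PySem.Chars.join, List.intercalate]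
  | cons x xs ih =>
    cases xs with
    | nil => simp [PySem.Chars.join, List.intercalate]
    | cons y ys =>
      simp [PySem.Chars.join, List.intercalate] at ih ⊢
      simpa using ih

-- membership in A's i_positions list is exactly "the character at that index matches"
theorem mem_i_positions_iff (s : List Char) (mc : List Char) (i : Int)
    (h0 : 0 ≤ i) (h1 : i < (s.length : Int)) :
    (i ∈ ((PySem.List.enumerate s 0).filter (fun p => [p.2] == mc)).map (·.1)) ↔
      [s[i.toNat]'(by omega)] = mc := by
  simp only [List.mem_map, List.mem_filter]
  constructor
  · rintro ⟨⟨j, c⟩, ⟨hmem, hpred⟩, rfl⟩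
    rw [PySem.List.mem_enumerate_iff] at hmem
    obtain ⟨k, hk, hp⟩ := hmem
    simp at hpred
    cases hp
    simpa [Int.toNat_natCast] using hpred
  · intro hm
    refine ⟨(i, s[i.toNat]'(by omega)), ?_, rfl⟩
    rw [PySem.List.mem_enumerate_iff]
    refine ⟨⟨i.toNat, by omega, ?_⟩, by simpa using hm⟩
    simp [h0]

theorem format_table_divider_spec : Claim_equal_format_table_divider := by
  intro scan_str match_char i_char fill_char _
  unfold Spec_format_table_divider format_table_divider format_table_divider_alt
  simp only []
  congr 1
  rw [join_nil_eq_flatten, ← List.flatMap_def]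
  have h1 : (PySem.List.pyRange 0 (PySem.List.len scan_str.toList) 1).foldl
      (fun divider i =>
        if (((PySem.List.enumerate scan_str.toList 0).filter
              (fun p => [p.2] == match_char.toList)).map (·.1)).contains i
        then divider ++ i_char.toList else divider ++ fill_char.toList)
      ([] : List Char)
      = scan_str.toList.foldl
          (fun acc c =>
            acc ++ if [c] == match_char.toList then i_char.toList else fill_char.toList)
          ([] : List Char) := by
    rw [← PySem.List.foldl_pyRange_zero_pyGetD scan_str.toList 'a'
        (fun acc c =>
          acc ++ if [c] == match_char.toList then i_char.toList else fill_char.toList)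
        ([] : List Char)]
    apply PySem.List.foldl_congr_mem
    intro acc i hi
    rw [PySem.List.mem_pyRange_one] at hi
    simp only [PySem.List.len] at hi ⊢
    have hget := PySem.List.pyGetD_eq_getElem scan_str.toList 'a' hi.1 hi.2
    rw [hget]
    by_cases h : [scan_str.toList[i.toNat]'(by omega)] = match_char.toList
    · have hm := (mem_i_positions_iff _ _ i hi.1 hi.2).2 h
      simp [List.contains_eq_mem, hm, h]
    · have hm : i ∉ ((PySem.List.enumerate scan_str.toList 0).filter
          (fun p => [p.2] == match_char.toList)).map (·.1) :=
        fun hc => h ((mem_i_positions_iff _ _ i hi.1 hi.2).1 hc)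
      simp [List.contains_eq_mem, hm, h]
  rw [h1, PySem.List.foldl_append_eq_flatMap, List.nil_append]
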